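-- pv_equiv track=rewrite | github.com/songhee-lee/2023-python-coding-test | Programmers/05. 110 옮기기.py | solution
-- ===== SOURCE A (Python) =====
-- def solution(s):
--     answer = []
--     for string in s:
--         count, idx, stack, n = 0, 0, "", len(string)
--
--         # 110 찾기
--         for idx in range(n):
--             if string[idx] == "0" and stack[-2:] == "11":
--                 stack = stack[:-2]
--                 count += 1
--             else:
--                 stack += string[idx]
--
--         idx = stack.find("111")             # 110이 빠진 string에서 111 찾기
--         if idx == -1:                       # 0뒤에 110 반복해 붙이기
--             idx = stack.rfind('0')
--             stack = stack[:idx+1]+"110"*count+stack[idx+1:]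
--         else:                               # 111앞에 110 반복해 붙이기
--             stack = stack[:idx]+"110"*count+stack[idx:]
--         answer.append(stack)
--     return answer
-- ===== SOURCE B (Python) =====
-- def solution(s):
--     answer = []
--     for string in s:
--         # run-length state machine: pieces (k, c) = run of k ones followed by
--         # a non-'1' character c; `ones` = current trailing run of ones.
--         parts = []
--         ones = 0
--         count = 0
--         for ch in string:
--             if ch == '1':
--                 ones += 1
--             elif ch == '0' and ones >= 2:
--                 ones -= 2
--                 count += 1
--             else:
--                 parts.append((ones, ch))
--                 ones = 0
--         # insertion position from the pieces: first run of >= 3 ones,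
--         # otherwise just after the last '0' (or 0 if there is none).
--         pos = None
--         off = 0
--         last0 = -1
--         for k, c in parts:
--             if pos is None and k >= 3:
--                 pos = off
--             if c == '0':
--                 last0 = off + k
--             off += k + 1
--         if pos is None and ones >= 3:
--             pos = off
--         if pos is None:
--             pos = last0 + 1
--         res = ''.join('1' * k + c for k, c in parts) + '1' * ones
--         answer.append(res[:pos] + '110' * count + res[pos:])
--     return answer
-- ===== Notes on version B (the rewrite author's own statement) =====
-- stated objective: alternative
-- what changed: B replaces A's character stack and its string searches (find('111'), rfind('0')) by a run-length state machine: it keeps an integer counter of the trailing run of ones plus a list of (run-length, char) pieces, reduces '110' by just decrementing the counter by 2, and derives the insertion position from one scan over the pieces (first piece with run >= 3, last piece whose char is '0') with a single final join.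
import Mathlib
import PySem

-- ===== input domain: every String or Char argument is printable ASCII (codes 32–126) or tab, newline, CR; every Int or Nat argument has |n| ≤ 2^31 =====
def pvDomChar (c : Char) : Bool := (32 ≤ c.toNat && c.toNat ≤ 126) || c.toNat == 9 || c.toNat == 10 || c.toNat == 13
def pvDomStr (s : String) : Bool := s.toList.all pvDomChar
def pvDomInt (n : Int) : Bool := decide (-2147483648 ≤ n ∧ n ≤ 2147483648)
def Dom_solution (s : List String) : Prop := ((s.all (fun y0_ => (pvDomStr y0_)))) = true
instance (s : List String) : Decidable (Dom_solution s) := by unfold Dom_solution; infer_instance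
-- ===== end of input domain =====

-- B replaces A's character stack and its searches find("111")/rfind('0') by a run-length state
-- machine (integer counter of trailing ones + (run,char) pieces, one scan, one final join).

-- ===== PORT A =====
-- A's inner loop: the stack is a string (List Char here); pop two via slicing, push via concat.
def solutionStepA (p : Int × List Char) (c : Char) : Int × List Char :=
  if c = '0' ∧ PySem.List.slice p.2 (some (-2)) none = ['1', '1'] then
    (p.1 + 1, PySem.List.slice p.2 none (some (-2)))
  else
    (p.1, p.2 ++ [c])

-- A after the loop: stack.find("111"), else stack.rfind('0'), splice "110"*count in by slicing.
def solutionPostA (count : Int) (stack : List Char) : String :=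
  let idx := PySem.Chars.find stack ['1', '1', '1']
  if idx = -1 then
    let j := PySem.Chars.rfind stack ['0']
    String.ofList (PySem.List.slice stack none (some (j + 1)) ++
      PySem.List.pyRepeat ['1', '1', '0'] count ++ PySem.List.slice stack (some (j + 1)) none)
  else
    String.ofList (PySem.List.slice stack none (some idx) ++
      PySem.List.pyRepeat ['1', '1', '0'] count ++ PySem.List.slice stack (some idx) none)

def solutionOneA (str : String) : String :=
  let r := str.toList.foldl solutionStepA (0, [])
  solutionPostA r.1 r.2

def solution (s : List String) : List String := s.map solutionOneA

-- ===== PORT B =====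
-- B's inner loop: state (parts, ones, count); a '110' reduction is just `ones -= 2`.
def altStep (st : List (Int × Char) × Int × Int) (ch : Char) : List (Int × Char) × Int × Int :=
  if ch = '1' then (st.1, st.2.1 + 1, st.2.2)
  else if ch = '0' ∧ 2 ≤ st.2.1 then (st.1, st.2.1 - 2, st.2.2 + 1)
  else (st.1 ++ [(st.2.1, ch)], 0, st.2.2)

-- B's scan over the pieces: (pos, off, last0) exactly as in Source B's second loop.
def altScanStep (st : Option Int × Int × Int) (p : Int × Char) : Option Int × Int × Int :=
  ((if st.1 = none ∧ 3 ≤ p.1 then some st.2.1 else st.1),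
   st.2.1 + p.1 + 1,
   (if p.2 = '0' then st.2.1 + p.1 else st.2.2))

def solutionOneB (str : String) : String :=
  let r := str.toList.foldl altStep ([], 0, 0)
  let sc := r.1.foldl altScanStep (none, 0, -1)
  let pos : Int := match sc.1 with
    | some p => p
    | none => if 3 ≤ r.2.1 then sc.2.1 else sc.2.2 + 1
  let res := r.1.flatMap (fun p => PySem.List.pyRepeat ['1'] p.1 ++ [p.2]) ++
      PySem.List.pyRepeat ['1'] r.2.1
  String.ofList (PySem.List.slice res none (some pos) ++
    PySem.List.pyRepeat ['1', '1', '0'] r.2.2 ++ PySem.List.slice res (some pos) none)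

def solution_alt (s : List String) : List String := s.map solutionOneB

-- ===== PRECONDITION & SPEC =====
def Spec_solution (s : List String) (out : List String) : Prop := out = solution_alt s
instance (s : List String) (out : List String) : Decidable (Spec_solution s out) := by unfold Spec_solution; infer_instance

-- ===== CLAIM (what is proved, stated in full; the proofs are below) =====
def Claim_equal_solution : Prop := ∀ (s : List String), Dom_solution s → Spec_solution s (solution s)

-- ===== LEMMAS AND PROOFS =====

-- rendering B's pieces back to A's stack
def render (parts : List (Int × Char)) : List Char :=
  parts.flatMap (fun p => List.replicate p.1.toNat '1' ++ [p.2])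

-- invariant on B's state: run lengths nonnegative, piece chars are not '1'
def InvP (parts : List (Int × Char)) : Prop := ∀ p ∈ parts, 0 ≤ p.1 ∧ p.2 ≠ '1'

-- spec functions of the piece list (Nat-valued)
def offAll : List (Int × Char) → Nat
  | [] => 0
  | p :: r => p.1.toNat + 1 + offAll r

def firstBig : List (Int × Char) → Option Nat
  | [] => none
  | p :: r => if 3 ≤ p.1.toNat then some 0 else (firstBig r).map (· + (p.1.toNat + 1))

def lastZ : List (Int × Char) → Option Nat
  | [] => none
  | p :: r =>
    match lastZ r with
    | some q => some (p.1.toNat + 1 + q)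
    | none => if p.2 = '0' then some p.1.toNat else none

-- first index of a "111" occurrence, structural version
def firstTriple : List Char → Option Nat
  | [] => none
  | c :: t => if (c :: t).take 3 = ['1', '1', '1'] then some 0 else (firstTriple t).map (· + 1)

-- last index of a '0', structural version
def lastZero : List Char → Option Nat
  | [] => none
  | c :: t =>
    match lastZero t with
    | some p => some (p + 1)
    | none => if c = '0' then some 0 else none

theorem find_go_eq (l : List Char) (k : Nat) :
    PySem.Chars.find.go ['1', '1', '1'] l k =
      match firstTriple l with
      | some p => ((k + p : Nat) : Int)
      | none => -1 := by
  induction l generalizing k with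
  | nil => simp [PySem.Chars.find.go, firstTriple]
  | cons c t ih =>
    rw [PySem.Chars.find.go, firstTriple, ih]
    have hpre : (['1', '1', '1'].isPrefixOf (c :: t)) = true ↔ (c :: t).take 3 = ['1', '1', '1'] := by
      rw [List.isPrefixOf_iff_prefix, List.prefix_iff_eq_take]
      constructor <;> (intro h; exact h.symm)
    by_cases hcond : (c :: t).take 3 = ['1', '1', '1']
    · rw [if_pos (hpre.mpr hcond), if_pos hcond]; simp
    · rw [if_neg (fun h => hcond (hpre.mp h)), if_neg hcond]
      rcases firstTriple t with _ | p
      · simp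
      · simp only [Option.map_some]
        push_cast; ring

theorem lastZero_concat (l : List Char) (c : Char) :
    lastZero (l ++ [c]) = if c = '0' then some l.length else lastZero l := by
  induction l with
  | nil => simp [lastZero]
  | cons d t ih =>
    rw [List.cons_append, lastZero, ih, lastZero]
    by_cases hc : c = '0'
    · simp [hc]
    · simp [hc]

theorem prefix_zero_iff (s : List Char) (j : Nat) :
    (['0'].isPrefixOf (s.drop j)) = true ↔ s[j]? = some '0' := by
  rw [List.isPrefixOf_iff_prefix]
  rcases h : (s.drop j) with _ | ⟨a, t⟩
  · simp [← List.head?_drop, h]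
  · have ha : s[j]? = some a := by rw [← List.head?_drop, h]; exact List.head?_cons
    simp [ha, List.cons_prefix_cons, eq_comm]

theorem rfind_go_eq (s : List Char) (j : Nat) (hj : j ≤ s.length) :
    PySem.Chars.rfind.go s ['0'] j =
      match lastZero (s.take (j + 1)) with
      | some p => (p : Int)
      | none => -1 := by
  induction j with
  | zero =>
    rw [PySem.Chars.rfind.go]
    by_cases h0 : s[0]? = some '0'
    · have hp : (['0'].isPrefixOf s) = true := (prefix_zero_iff s 0).mpr h0
      rw [if_pos hp]
      rcases s with _ | ⟨a, t⟩
      · simp at h0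
      · have ha : a = '0' := by simpa using h0
        simp [ha, List.take, lastZero]
    · have hp : ¬ (['0'].isPrefixOf s) = true := fun h => h0 ((prefix_zero_iff s 0).mp h)
      rw [if_neg hp]
      rcases s with _ | ⟨a, t⟩
      · simp [lastZero]
      · have ha : ¬ a = '0' := by simpa using h0
        simp [List.take, lastZero, ha]
  | succ j ih =>
    rw [PySem.Chars.rfind.go]
    have hj' : j ≤ s.length := by omega
    by_cases h0 : s[j + 1]? = some '0'
    · rw [if_pos ((prefix_zero_iff s (j + 1)).mpr h0)]
      have ht : s.take (j + 1 + 1) = s.take (j + 1) ++ ['0'] := by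
        rw [List.take_succ, h0]; rfl
      rw [ht, lastZero_concat, if_pos rfl]
      simp [List.length_take]
      omega
    · rw [if_neg (fun h => h0 ((prefix_zero_iff s (j + 1)).mp h)), ih hj']
      rcases Nat.lt_or_ge (j + 1) s.length with hlt | hge
      · obtain ⟨c, hc⟩ : ∃ c, s[j + 1]? = some c := ⟨s[j + 1], List.getElem?_eq_getElem hlt⟩
        have hcne : ¬ c = '0' := fun h => h0 (h ▸ hc)
        have ht : s.take (j + 1 + 1) = s.take (j + 1) ++ [c] := by
          rw [List.take_succ, hc]; rfl
        rw [ht, lastZero_concat, if_neg hcne]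
      · have h1 : s.take (j + 1 + 1) = s := List.take_of_length_le (by omega)
        have h2 : s.take (j + 1) = s := List.take_of_length_le (by omega)
        rw [h1, h2]

-- render is B's residual string
theorem render_eq_res (parts : List (Int × Char)) :
    parts.flatMap (fun p => PySem.List.pyRepeat ['1'] p.1 ++ [p.2]) = render parts := by
  unfold render
  exact List.flatMap_congr (fun p _ => by rw [PySem.List.pyRepeat_singleton])

-- the last character of a rendered piece list is never '1'
theorem render_last_ne_one (parts : List (Int × Char)) (hI : InvP parts) (c : Char)
    (h : (render parts).getLast? = some c) : c ≠ '1' := by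
  induction parts with
  | nil => simp [render] at h
  | cons p r ih =>
    have hr : render (p :: r) = (List.replicate p.1.toNat '1' ++ [p.2]) ++ render r := by
      simp [render]
    rcases hren : render r with _ | ⟨d, t⟩
    · rw [hr, hren, List.append_nil, List.getLast?_concat] at h
      have : c = p.2 := by simpa using h.symm
      exact this ▸ (hI p (by simp)).2
    · rw [hr, hren] at h
      rw [List.getLast?_append_of_ne_nil (l₁ := List.replicate p.1.toNat '1' ++ [p.2])
        (by simp : (d :: t : List Char) ≠ [])] at h
      exact ih (fun q hq => hI q (by simp [hq])) (hren ▸ h)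

-- ends-with-['1','1'] characterization of A's pop condition
theorem drop2_eq_iff (R : List Char) :
    R.drop (R.length - 2) = ['1', '1'] ↔ ∃ t, R = t ++ ['1', '1'] := by
  constructor
  · intro h
    refine ⟨R.take (R.length - 2), ?_⟩
    rw [← h, List.take_append_drop]
  · rintro ⟨t, rfl⟩
    have : (t ++ ['1', '1']).length - 2 = t.length := by simp
    rw [this]
    simpa using List.drop_left' (l₁ := t) (l₂ := ['1', '1']) rfl

theorem cond_iff (parts : List (Int × Char)) (ones : Int) (hI : InvP parts) (h0 : 0 ≤ ones) :
    ((render parts ++ List.replicate ones.toNat '1').drop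
      ((render parts ++ List.replicate ones.toNat '1').length - 2) = ['1', '1'] ↔ 2 ≤ ones) := by
  rw [drop2_eq_iff]
  constructor
  · rintro ⟨t, ht⟩
    by_contra hle
    have hm : ones.toNat = 0 ∨ ones.toNat = 1 := by omega
    rcases hm with hm | hm
    · rw [hm, List.replicate_zero, List.append_nil] at ht
      have := render_last_ne_one parts hI '1' (by rw [ht]; simp)
      exact this rfl
    · rw [hm] at ht
      have hdl : render parts = t ++ ['1'] := by
        have := congrArg List.dropLast ht
        simpa [List.dropLast_concat] using this
      have := render_last_ne_one parts hI '1' (by rw [hdl]; simp)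
      exact this rfl
  · intro h2
    refine ⟨render parts ++ List.replicate (ones.toNat - 2) '1', ?_⟩
    rw [List.append_assoc]
    congr 1
    have : ones.toNat = (ones.toNat - 2) + 2 := by omega
    rw [this, List.replicate_add]
    rfl

-- one loop step of A simulated by one loop step of B
theorem step_sim (parts : List (Int × Char)) (ones count : Int) (ch : Char)
    (hI : InvP parts) (h0 : 0 ≤ ones) :
    solutionStepA (count, render parts ++ List.replicate ones.toNat '1') ch
      = ((altStep (parts, ones, count) ch).2.2,
         render (altStep (parts, ones, count) ch).1 ++
           List.replicate ((altStep (parts, ones, count) ch).2.1).toNat '1') := by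
  unfold solutionStepA altStep
  rw [PySem.List.slice_from_neg_ofNat _ 2 (by omega), PySem.List.slice_to_neg_ofNat _ 2 (by omega)]
  by_cases h1 : ch = '1'
  · subst h1
    rw [if_neg (by rintro ⟨hc, -⟩; exact absurd hc (by decide)), if_pos rfl]
    simp only [Prod.mk.injEq]
    refine ⟨by trivial, ?_⟩
    rw [List.append_assoc]
    congr 1
    have h : (ones + 1).toNat = ones.toNat + 1 := by omega
    rw [h, List.replicate_succ']
  · rw [if_neg h1]
    by_cases h2 : ch = '0' ∧ 2 ≤ ones
    · rw [if_pos h2, if_pos ⟨h2.1, (cond_iff parts ones hI h0).mpr h2.2⟩]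
      simp only [Prod.mk.injEq]
      refine ⟨by trivial, ?_⟩
      have hlen : (render parts ++ List.replicate ones.toNat '1').length - 2
          = (render parts).length + (ones.toNat - 2) := by
        simp [List.length_append]; omega
      have h : (ones - 2).toNat = ones.toNat - 2 := by omega
      have h2 : (render parts).length + (ones.toNat - 2) - (render parts).length
          = ones.toNat - 2 := by omega
      rw [hlen, List.take_append, List.take_of_length_le (by omega), h2, List.take_replicate,
        min_eq_left (by omega), h]
    · rw [if_neg h2]
      rw [if_neg (by rintro ⟨hc, hcond⟩; exact h2 ⟨hc, (cond_iff parts ones hI h0).mp hcond⟩)]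
      simp only [Prod.mk.injEq]
      refine ⟨by trivial, ?_⟩
      rw [show ((0 : Int)).toNat = 0 from rfl, List.replicate_zero, List.append_nil]
      unfold render
      rw [List.flatMap_append]
      simp [List.append_assoc]

theorem altStep_inv (parts : List (Int × Char)) (ones count : Int) (ch : Char)
    (hI : InvP parts) (h0 : 0 ≤ ones) (h1 : ch ≠ '1') (hcase : ¬ (ch = '0' ∧ 2 ≤ ones)) :
    InvP (parts ++ [(ones, ch)]) := by
  intro p hp
  rcases List.mem_append.mp hp with h | h
  · exact hI p h
  · simp at h
    subst h
    exact ⟨h0, h1⟩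

-- the whole inner loop, by induction on the string
theorem fold_sim (l : List Char) : ∀ (parts : List (Int × Char)) (ones count : Int),
    InvP parts → 0 ≤ ones →
    l.foldl solutionStepA (count, render parts ++ List.replicate ones.toNat '1')
      = ((l.foldl altStep (parts, ones, count)).2.2,
         render (l.foldl altStep (parts, ones, count)).1 ++
           List.replicate ((l.foldl altStep (parts, ones, count)).2.1).toNat '1')
    ∧ InvP (l.foldl altStep (parts, ones, count)).1
    ∧ 0 ≤ (l.foldl altStep (parts, ones, count)).2.1 := by
  induction l with
  | nil => intro parts ones count hI h0; exact ⟨rfl, hI, h0⟩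
  | cons c t ih =>
    intro parts ones count hI h0
    rw [List.foldl_cons, List.foldl_cons, step_sim parts ones count c hI h0]
    unfold altStep
    by_cases h1 : c = '1'
    · rw [if_pos h1]
      exact ih parts (ones + 1) count hI (by omega)
    · rw [if_neg h1]
      by_cases h2 : c = '0' ∧ 2 ≤ ones
      · rw [if_pos h2]
        exact ih parts (ones - 2) (count + 1) hI (by omega)
      · rw [if_neg h2]
        exact ih (parts ++ [(ones, c)]) 0 count (altStep_inv parts ones count c hI h0 h1 h2) le_rfl

-- B's piece scan computes firstBig / offAll / lastZ
theorem scan_eq (parts : List (Int × Char)) (hI : InvP parts) :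
    ∀ (off0 : Nat) (pos0 : Option Int) (lz0 : Int),
    parts.foldl altScanStep (pos0, (off0 : Int), lz0)
      = ((match pos0 with
          | some q => some q
          | none => (firstBig parts).map (fun q => ((off0 + q : Nat) : Int))),
         ((off0 + offAll parts : Nat) : Int),
         (match lastZ parts with
          | some q => ((off0 + q : Nat) : Int)
          | none => lz0)) := by
  induction parts with
  | nil => intro off0 pos0 lz0; cases pos0 <;> simp [firstBig, offAll, lastZ]
  | cons p r ih =>
    intro off0 pos0 lz0
    have hk : 0 ≤ p.1 := (hI p (by simp)).1
    have hIr : InvP r := fun q hq => hI q (by simp [hq])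
    rw [List.foldl_cons]
    have hoff : (off0 : Int) + p.1 + 1 = ((off0 + p.1.toNat + 1 : Nat) : Int) := by
      push_cast; omega
    have hstep : altScanStep (pos0, (off0 : Int), lz0) p
        = ((if pos0 = none ∧ 3 ≤ p.1 then some (off0 : Int) else pos0),
           ((off0 + p.1.toNat + 1 : Nat) : Int),
           (if p.2 = '0' then ((off0 + p.1.toNat : Nat) : Int) else lz0)) := by
      unfold altScanStep
      rw [hoff]
      congr 1
      congr 1
      by_cases hz : p.2 = '0'
      · rw [if_pos hz, if_pos hz]; push_cast; omega
      · rw [if_neg hz, if_neg hz]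
    rw [hstep, ih hIr (off0 + p.1.toNat + 1)]
    have h3 : (3 ≤ p.1) ↔ (3 ≤ p.1.toNat) := by omega
    refine Prod.ext ?_ (Prod.ext ?_ ?_) <;> simp only []
    · cases pos0 with
      | some q => rw [if_neg (by simp)]
      | none =>
        by_cases hb : 3 ≤ p.1
        · rw [if_pos ⟨rfl, hb⟩]
          rw [show firstBig (p :: r) = some 0 by rw [firstBig, if_pos (h3.mp hb)]]
          simp
        · rw [if_neg (by rintro ⟨-, hh⟩; exact hb hh)]
          rw [show firstBig (p :: r) = (firstBig r).map (· + (p.1.toNat + 1)) by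
            rw [firstBig, if_neg (fun hh => hb (h3.mpr hh))]]
          cases hfb : firstBig r with
          | none => simp
          | some q => simp; push_cast; omega
    · rw [show offAll (p :: r) = p.1.toNat + 1 + offAll r from rfl]
      congr 1
      omega
    · cases hlz : lastZ r with
      | some q =>
        rw [show lastZ (p :: r) = some (p.1.toNat + 1 + q) by rw [lastZ, hlz]]
        simp only []
        congr 1
        omega
      | none =>
        rw [show lastZ (p :: r) = if p.2 = '0' then some p.1.toNat else none by rw [lastZ, hlz]]
        by_cases hz : p.2 = '0' <;> simp [hz]

-- firstTriple over one rendered piece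
theorem firstTriple_piece (k : Nat) (c : Char) (hc : c ≠ '1') (rest : List Char) :
    firstTriple (List.replicate k '1' ++ c :: rest)
      = if 3 ≤ k then some 0 else (firstTriple rest).map (· + (k + 1)) := by
  by_cases h3 : 3 ≤ k
  · rw [if_pos h3]
    have hk : List.replicate k '1' = '1' :: '1' :: '1' :: List.replicate (k - 3) '1' := by
      conv_lhs => rw [show k = 3 + (k - 3) by omega]
      rw [List.replicate_add]
      simp [List.replicate_succ]
    rw [hk, List.cons_append, List.cons_append, List.cons_append, firstTriple]
    rw [if_pos (by simp)]
  · rw [if_neg h3]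
    interval_cases k
    · rw [List.replicate_zero, List.nil_append, firstTriple]
      rw [if_neg (by intro h; apply hc; have := congrArg (fun l => l.head?) h; simpa using this)]
    · rw [show List.replicate 1 '1' = ['1'] from rfl, List.cons_append, List.nil_append, firstTriple]
      rw [if_neg (by
        intro h
        apply hc
        have := congrArg (fun l => l[1]?) h
        simpa using this)]
      rw [firstTriple]
      rw [if_neg (by intro h; apply hc; have := congrArg (fun l => l.head?) h; simpa using this)]
      cases firstTriple rest <;> simp
    · rw [show List.replicate 2 '1' = ['1', '1'] from rfl]
      rw [List.cons_append, List.cons_append, List.nil_append, firstTriple]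
      rw [if_neg (by
        intro h
        apply hc
        have := congrArg (fun l => l[2]?) h
        simpa using this)]
      rw [firstTriple]
      rw [if_neg (by
        intro h
        apply hc
        have := congrArg (fun l => l[1]?) h
        simpa using this)]
      rw [firstTriple]
      rw [if_neg (by intro h; apply hc; have := congrArg (fun l => l.head?) h; simpa using this)]
      cases firstTriple rest with
      | none => simp
      | some q => simp

theorem firstTriple_replicate (t : Nat) :
    firstTriple (List.replicate t '1') = if 3 ≤ t then some 0 else none := by
  by_cases h3 : 3 ≤ t
  · rw [if_pos h3]
    have hk : List.replicate t '1' = '1' :: '1' :: '1' :: List.replicate (t - 3) '1' := by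
      conv_lhs => rw [show t = 3 + (t - 3) by omega]
      rw [List.replicate_add]
      simp [List.replicate_succ]
    rw [hk, firstTriple, if_pos (by simp)]
  · rw [if_neg h3]
    interval_cases t <;> simp [firstTriple]

theorem firstTriple_render (parts : List (Int × Char)) (hI : InvP parts) (t : Nat) :
    firstTriple (render parts ++ List.replicate t '1')
      = match firstBig parts with
        | some q => some q
        | none => if 3 ≤ t then some (offAll parts) else none := by
  induction parts with
  | nil =>
    rw [show render [] = [] from rfl, List.nil_append, firstTriple_replicate]
    rw [show firstBig [] = none from rfl, show offAll [] = 0 from rfl]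
  | cons p r ih =>
    have hc : p.2 ≠ '1' := (hI p (by simp)).2
    have hIr : InvP r := fun q hq => hI q (by simp [hq])
    have hren : render (p :: r) ++ List.replicate t '1'
        = List.replicate p.1.toNat '1' ++ p.2 :: (render r ++ List.replicate t '1') := by
      simp [render]
    rw [hren, firstTriple_piece _ _ hc, ih hIr]
    rw [firstBig, offAll]
    by_cases h3 : 3 ≤ p.1.toNat
    · rw [if_pos h3, if_pos h3]
    · rw [if_neg h3, if_neg h3]
      cases hfb : firstBig r with
      | some q => simp
      | none =>
        by_cases ht : 3 ≤ t
        · rw [if_pos ht]; simp; omega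
        · rw [if_neg ht]; simp; omega

theorem lastZero_replicate_prefix (m : Nat) (l : List Char) :
    lastZero (List.replicate m '1' ++ l) = (lastZero l).map (· + m) := by
  induction m with
  | zero => simp
  | succ m ih =>
    rw [List.replicate_succ, List.cons_append, lastZero, ih]
    cases lastZero l with
    | none => simp
    | some q => simp; omega

theorem lastZero_replicate_one (t : Nat) : lastZero (List.replicate t '1') = none := by
  induction t with
  | zero => rfl
  | succ t ih => rw [List.replicate_succ, lastZero, ih]; simp

theorem lastZero_replicate_suffix (l : List Char) (t : Nat) :
    lastZero (l ++ List.replicate t '1') = lastZero l := by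
  induction l with
  | nil => rw [List.nil_append, lastZero_replicate_one]; rfl
  | cons c r ih => rw [List.cons_append, lastZero, ih, lastZero]

theorem lastZero_render (parts : List (Int × Char)) (hI : InvP parts) :
    lastZero (render parts) = lastZ parts := by
  induction parts with
  | nil => rfl
  | cons p r ih =>
    have hIr : InvP r := fun q hq => hI q (by simp [hq])
    have hren : render (p :: r)
        = List.replicate p.1.toNat '1' ++ p.2 :: render r := by
      simp [render]
    rw [hren, lastZero_replicate_prefix, lastZero, ih hIr, lastZ]
    cases lastZ r with
    | some q => simp; omega
    | none =>
      by_cases hz : p.2 = '0' <;> simp [hz]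

-- the two post-processing phases coincide on corresponding states
theorem post_eq (parts : List (Int × Char)) (ones count : Int) (hI : InvP parts) (h0 : 0 ≤ ones) :
    solutionPostA count (render parts ++ List.replicate ones.toNat '1')
      = (let sc := parts.foldl altScanStep (none, 0, -1)
         let pos : Int := match sc.1 with
           | some p => p
           | none => if 3 ≤ ones then sc.2.1 else sc.2.2 + 1
         let res := parts.flatMap (fun p => PySem.List.pyRepeat ['1'] p.1 ++ [p.2]) ++
             PySem.List.pyRepeat ['1'] ones
         String.ofList (PySem.List.slice res none (some pos) ++
           PySem.List.pyRepeat ['1', '1', '0'] count ++ PySem.List.slice res (some pos) none)) := by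
  have hres : parts.flatMap (fun p => PySem.List.pyRepeat ['1'] p.1 ++ [p.2]) ++
      PySem.List.pyRepeat ['1'] ones = render parts ++ List.replicate ones.toNat '1' := by
    rw [render_eq_res, PySem.List.pyRepeat_singleton]
  have hscan := scan_eq parts hI 0 none (-1)
  rw [Nat.cast_zero] at hscan
  simp only [Nat.zero_add] at hscan
  simp only [hres]
  set R := render parts ++ List.replicate ones.toNat '1' with hR
  have hfind : PySem.Chars.find R ['1', '1', '1']
      = match firstTriple R with
        | some p => ((p : Nat) : Int)
        | none => -1 := by
    show PySem.Chars.find.go ['1', '1', '1'] R 0 = _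
    rw [find_go_eq]
    rcases firstTriple R with _ | p <;> simp
  have hrfind : PySem.Chars.rfind R ['0']
      = match lastZero R with
        | some p => (p : Int)
        | none => -1 := by
    show PySem.Chars.rfind.go R ['0'] R.length = _
    rw [rfind_go_eq R R.length (le_refl _), List.take_of_length_le (by omega)]
  have hFT := firstTriple_render parts hI ones.toNat
  have hLZ : lastZero R = lastZ parts := by
    rw [hR, lastZero_replicate_suffix, lastZero_render parts hI]
  have h3 : (3 ≤ ones) ↔ (3 ≤ ones.toNat) := by omega
  unfold solutionPostA
  rw [hscan]
  simp only []
  cases hfb : firstBig parts with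
  | some q =>
    have hft : firstTriple R = some q := by rw [hFT, hfb]
    rw [hfind, hft]
    simp only []
    rw [if_neg (by simp), PySem.List.slice_to_natCast, PySem.List.slice_from_natCast]
    simp
  | none =>
    by_cases ht : 3 ≤ ones
    · have hft : firstTriple R = some (offAll parts) := by
        rw [hFT, hfb]; simp only []; rw [if_pos (h3.mp ht)]
      rw [hfind, hft]
      simp only []
      rw [if_neg (by simp), if_pos ht, PySem.List.slice_to_natCast, PySem.List.slice_from_natCast]
      simp
    · have hft : firstTriple R = none := by
        rw [hFT, hfb]; simp only []; rw [if_neg (fun hh => ht (h3.mpr hh))]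
      rw [hfind, hft]
      simp only []
      simp only [Option.map_none, if_true]
      rw [hrfind, hLZ, if_neg ht]

theorem solutionOne_eq (str : String) : solutionOneA str = solutionOneB str := by
  unfold solutionOneA solutionOneB
  obtain ⟨heq, hI, h0⟩ := fold_sim str.toList [] 0 0 (by intro p hp; simp at hp) le_rfl
  have hinit : ((0 : Int), ([] : List Char))
      = ((0 : Int), render [] ++ List.replicate ((0 : Int)).toNat '1') := rfl
  rw [hinit, heq]
  exact post_eq _ _ _ hI h0

-- ===== VERDICT (by name: the statement is the Claim_ definition above) =====
theorem solution_spec : Claim_equal_solution := by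
  intro s _
  unfold Spec_solution solution solution_alt
  exact List.map_congr_left fun x _ => solutionOne_eq x
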